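-- pv_equiv track=rewrite | github.com/sagemath/sage-archive-2023-02-01 | src/sage/combinat/necklace.py | _lyn
-- ===== SOURCE A (Python) =====
-- def _lyn(w):
--     """
--     Returns the length of the longest prefix of ``w`` that is a Lyndon word.
--
--     EXAMPLES::
--
--         sage: import sage.combinat.necklace as necklace
--         sage: necklace._lyn([0,1,1,0,0,1,2])
--         3
--         sage: necklace._lyn([0,0,0,1])
--         4
--         sage: necklace._lyn([2,1,0,0,2,2,1])
--         1
--     """
--     p = 1
--     k = max(w)+1
--     for i in range(1, len(w)):
--         b = w[i]
--         a = w[:i]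
--         if b < a[i-p] or b > k-1:
--             return p
--         elif b == a[i-p]:
--             pass
--         else:
--             p = i+1
--     return p
-- ===== SOURCE B (Python) =====
-- def _lyn(w):
--     best = 0
--     for L in range(1, len(w) + 1):
--         pre = w[:L]
--         if all(pre < pre[j:] for j in range(1, L)):
--             best = L
--     return best
-- ===== Notes on version B (the rewrite author's own statement) =====
-- stated objective: simpler
-- what changed: Replaces Duval's incremental single-scan state machine by a direct definition-based search: test each prefix length L for the Lyndon property (strictly smaller than every proper suffix) and return the largest L that passes.
import Mathlib
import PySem

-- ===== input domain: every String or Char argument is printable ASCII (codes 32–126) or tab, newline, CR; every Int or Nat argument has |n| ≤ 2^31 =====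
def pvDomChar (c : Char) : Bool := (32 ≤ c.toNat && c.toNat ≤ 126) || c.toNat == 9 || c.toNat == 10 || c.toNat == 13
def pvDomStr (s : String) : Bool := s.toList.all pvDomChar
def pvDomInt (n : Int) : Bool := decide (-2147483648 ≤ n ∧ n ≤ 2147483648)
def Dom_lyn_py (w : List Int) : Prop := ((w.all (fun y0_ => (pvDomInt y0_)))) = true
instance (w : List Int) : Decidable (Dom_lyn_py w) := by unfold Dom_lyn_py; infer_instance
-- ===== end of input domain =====

-- B replaces Duval's incremental scan by a direct definition-based test of each prefix; objective: simpler.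


-- ===== PORT A =====
-- the for-loop with its early return, as a recursion over i (state p)
def lynGo (w : List Int) (k : Int) (i p : Nat) : Int :=
  if h : i < w.length then
    let b := (PySem.List.pyGet? w (i : Int)).getD 0
    let a := w.take i                                                -- a = w[:i]
    let ai := (PySem.List.pyGet? a ((i : Int) - (p : Int))).getD 0   -- a[i-p]; in range whenever reached
    if b < ai ∨ b > k - 1 then (p : Int)
    else if b = ai then lynGo w k (i + 1) p
    else lynGo w k (i + 1) (i + 1)
  else (p : Int)
termination_by w.length - i
decreasing_by all_goals omega

def lyn_py (w : List Int) : Int :=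
  match PySem.List.max? w (fun x => x) with
  | none => 0                       -- unreachable under Pre_: Python's max([]) raises ValueError
  | some m => lynGo w (m + 1) 1 1   -- p = 1; k = max(w)+1; loop from i = 1

-- ===== PORT B =====
-- exact port of Python's `<` on lists of ints (lexicographic; a proper prefix is smaller)
def pyListLt : List Int → List Int → Bool
  | _, [] => false
  | [], _ :: _ => true
  | a :: as, b :: bs => if a < b then true else if b < a then false else pyListLt as bs

-- all(pre < pre[j:] for j in range(1, L))
def lynTest (pre : List Int) (L : Nat) : Bool :=
  (List.range' 1 (L - 1)).all (fun j => pyListLt pre (pre.drop j))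

def lyn_py_alt (w : List Int) : Int :=
  (List.range' 1 w.length).foldl
    (fun best L => let pre := w.take L; if lynTest pre L then (L : Int) else best) 0

-- ===== PRECONDITION & SPEC =====
-- Pre_ excludes only the empty list, on which Python's A raises ValueError (max of empty sequence).
def Pre_lyn_py (w : List Int) : Prop := w ≠ []
instance (w : List Int) : Decidable (Pre_lyn_py w) := by unfold Pre_lyn_py; infer_instance

def pvWitness_lyn_py : List Int := [0, 1, 1, 0, 0, 1, 2]

def Spec_lyn_py (w : List Int) (out : Int) : Prop := out = lyn_py_alt w
instance (w : List Int) (out : Int) : Decidable (Spec_lyn_py w out) := by unfold Spec_lyn_py; infer_instance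

-- ===== CLAIM (what is proved, stated in full; the proofs are below) =====
def Claim_equal_lyn_py : Prop := ∀ (w : List Int), Dom_lyn_py w → Pre_lyn_py w → Spec_lyn_py w (lyn_py w)

-- ===== LEMMAS AND PROOFS =====

-- "v is a Lyndon word" in B's sense: strictly smaller than each proper suffix
def LyP (v : List Int) : Prop :=
  ∀ j : Nat, 1 ≤ j → j < v.length → pyListLt v (v.drop j) = true

-- getD through take / drop
theorem getD_take (w : List Int) (m o : Nat) (h : o < m) :
    (w.take m).getD o 0 = w.getD o 0 := by
  simp [List.getD, h]

theorem getD_drop (v : List Int) (j o : Nat) :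
    (v.drop j).getD o 0 = v.getD (j + o) 0 := by
  simp [List.getD, List.getElem?_drop]

-- first-difference characterizations of pyListLt
theorem pyLt_of_lt_at (k : Nat) : ∀ (v s : List Int),
    (∀ o, o < k → v.getD o 0 = s.getD o 0) → k < v.length → k < s.length →
    v.getD k 0 < s.getD k 0 → pyListLt v s = true := by
  induction k with
  | zero =>
    intro v s _ hv hs hlt
    match v, s with
    | a :: as, b :: bs =>
      simp [List.getD] at hlt
      simp [pyListLt, hlt]
  | succ k ih =>
    intro v s heq hv hs hlt
    match v, s with
    | a :: as, b :: bs =>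
      have h0 : a = b := by have := heq 0 (by omega); simpa [List.getD] using this
      have : pyListLt as bs = true := by
        refine ih as bs (fun o ho => ?_) (by simpa using hv) (by simpa using hs) ?_
        · have := heq (o + 1) (by omega); simpa [List.getD] using this
        · simpa [List.getD] using hlt
      simp [pyListLt, h0, this]

theorem pyLt_of_gt_at (k : Nat) : ∀ (v s : List Int),
    (∀ o, o < k → v.getD o 0 = s.getD o 0) → k < v.length → k < s.length →
    s.getD k 0 < v.getD k 0 → pyListLt v s = false := by
  induction k with
  | zero =>
    intro v s _ hv hs hlt
    match v, s with
    | a :: as, b :: bs =>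
      simp [List.getD] at hlt
      simp [pyListLt, hlt, not_lt_of_gt hlt]
  | succ k ih =>
    intro v s heq hv hs hlt
    match v, s with
    | a :: as, b :: bs =>
      have h0 : a = b := by have := heq 0 (by omega); simpa [List.getD] using this
      have : pyListLt as bs = false := by
        refine ih as bs (fun o ho => ?_) (by simpa using hv) (by simpa using hs) ?_
        · have := heq (o + 1) (by omega); simpa [List.getD] using this
        · simpa [List.getD] using hlt
      simp [pyListLt, h0, this]

theorem pyLt_of_prefix : ∀ (s v : List Int), s.length ≤ v.length →
    (∀ o, o < s.length → s.getD o 0 = v.getD o 0) → pyListLt v s = false := by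
  intro s
  induction s with
  | nil => intro v _ _; cases v <;> simp [pyListLt]
  | cons b bs ih =>
    intro v hlen heq
    match v with
    | a :: as =>
      have h0 : b = a := by have := heq 0 (by simp); simpa [List.getD] using this
      have : pyListLt as bs = false := by
        refine ih as (by simpa using hlen) (fun o ho => ?_)
        have := heq (o + 1) (by simpa using ho); simpa [List.getD] using this
      simp [pyListLt, h0, this]

theorem pyLt_cases : ∀ (v s : List Int), pyListLt v s = true →
    (v.length < s.length ∧ ∀ o, o < v.length → v.getD o 0 = s.getD o 0) ∨
    (∃ k, k < v.length ∧ k < s.length ∧ (∀ o, o < k → v.getD o 0 = s.getD o 0) ∧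
      v.getD k 0 < s.getD k 0) := by
  intro v
  induction v with
  | nil =>
    intro s h
    match s with
    | [] => simp [pyListLt] at h
    | b :: bs => exact Or.inl ⟨by simp, by intro o ho; simp at ho⟩
  | cons a as ih =>
    intro s h
    match s with
    | [] => simp [pyListLt] at h
    | b :: bs =>
      by_cases hab : a < b
      · exact Or.inr ⟨0, by simp, by simp, by intro o ho; omega, by simpa [List.getD] using hab⟩
      · by_cases hba : b < a
        · simp [pyListLt, hab, hba] at h
        · have hEq : a = b := le_antisymm (not_lt.1 hba) (not_lt.1 hab)
          have h' : pyListLt as bs = true := by simpa [pyListLt, hab, hba] using h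
          rcases ih bs h' with ⟨hl, he⟩ | ⟨k, hk1, hk2, he, hlt⟩
          · refine Or.inl ⟨by simpa using hl, fun o ho => ?_⟩
            cases o with
            | zero => simpa [List.getD] using hEq
            | succ o => have := he o (by simpa using ho); simpa [List.getD] using this
          · refine Or.inr ⟨k + 1, by simpa using hk1, by simpa using hk2, fun o ho => ?_, by simpa [List.getD] using hlt⟩
            cases o with
            | zero => simpa [List.getD] using hEq
            | succ o => have := he o (by omega); simpa [List.getD] using this

-- periodicity reduces any index below m to its residue mod p
theorem periodic_reduce (w : List Int) (p m : Nat) (hp : 1 ≤ p)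
    (hper : ∀ x, p ≤ x → x < m → w.getD x 0 = w.getD (x - p) 0) :
    ∀ x, x < m → w.getD x 0 = w.getD (x % p) 0 := by
  intro x
  induction x using Nat.strong_induction_on with
  | _ x ih =>
    intro hx
    by_cases hxp : x < p
    · rw [Nat.mod_eq_of_lt hxp]
    · have hpx : p ≤ x := not_lt.1 hxp
      have h1 : w.getD x 0 = w.getD (x - p) 0 := hper x hpx hx
      have h2 : w.getD (x - p) 0 = w.getD ((x - p) % p) 0 := ih (x - p) (by omega) (by omega)
      have h3 : (x - p) % p = x % p := by
        conv_rhs => rw [show x = (x - p) + p from by omega]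
        rw [Nat.add_mod_right]
      rw [h1, h2, h3]

-- the crux of Duval's algorithm: a bumped letter after a periodic run gives a Lyndon prefix
theorem crux (w : List Int) (p i : Nat) (hp : 1 ≤ p) (hpi : p ≤ i) (hin : i < w.length)
    (hu : LyP (w.take p))
    (hper : ∀ x, p ≤ x → x < i → w.getD x 0 = w.getD (x - p) 0)
    (hlt : w.getD (i - p) 0 < w.getD i 0) : LyP (w.take (i + 1)) := by
  intro j hj1 hj2
  set v := w.take (i + 1) with hv
  have hvlen : v.length = i + 1 := by simp only [hv, List.length_take]; omega
  rw [hvlen] at hj2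
  have gv : ∀ o, o < i + 1 → v.getD o 0 = w.getD o 0 := fun o ho => getD_take w (i + 1) o ho
  have gs : ∀ o, (v.drop j).getD o 0 = v.getD (j + o) 0 := fun o => getD_drop v j o
  have hslen : (v.drop j).length = i + 1 - j := by simp only [List.length_drop, hvlen]
  have PR : ∀ x, x < i → w.getD x 0 = w.getD (x % p) 0 := periodic_reduce w p i hp hper
  have hip : w.getD (i - p) 0 = w.getD (i % p) 0 := by
    rw [PR (i - p) (by omega)]
    congr 1
    conv_rhs => rw [show i = (i - p) + p from by omega]
    rw [Nat.add_mod_right]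
  by_cases hr : j % p = 0
  · -- j a multiple of p: first difference at offset i - j
    obtain ⟨c, rfl⟩ : p ∣ j := Nat.dvd_of_mod_eq_zero hr
    refine pyLt_of_lt_at (i - p * c) v (v.drop (p * c)) ?_ (by rw [hvlen]; omega)
      (by rw [hslen]; omega) ?_
    · intro o ho
      rw [gs o, gv o (by omega), gv (p * c + o) (by omega)]
      rw [PR o (by omega), PR (p * c + o) (by omega)]
      congr 1
      rw [Nat.mul_add_mod]
    · rw [gs (i - p * c), gv (i - p * c) (by omega), gv (p * c + (i - p * c)) (by omega)]
      rw [show p * c + (i - p * c) = i from by omega]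
      rw [PR (i - p * c) (by omega)]
      have hm2 : (i - p * c) % p = i % p := by
        conv_rhs => rw [show i = (i - p * c) + p * c from by omega]
        rw [Nat.add_mul_mod_self_left]
      rw [hm2, ← hip]
      exact hlt
  · -- j ≡ r ≢ 0 (mod p): use the mismatch of u against its r-shift
    set r := j % p with hrdef
    have hr1 : 1 ≤ r := by omega
    have hrp : r < p := Nat.mod_lt _ (by omega)
    have hulen : (w.take p).length = p := by simp only [List.length_take]; omega
    have gu : ∀ o, o < p → (w.take p).getD o 0 = w.getD o 0 := fun o ho => getD_take w p o ho
    have hu' : pyListLt (w.take p) ((w.take p).drop r) = true := hu r hr1 (by rw [hulen]; omega)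
    rcases pyLt_cases _ _ hu' with ⟨hl, _⟩ | ⟨d, hd1, hd2, hde, hdlt⟩
    · exfalso; rw [hulen, List.length_drop, hulen] at hl; omega
    · rw [hulen] at hd1
      have hd2' : d < p - r := by rw [List.length_drop, hulen] at hd2; omega
      have ude : ∀ o, o < d → w.getD o 0 = w.getD (r + o) 0 := by
        intro o ho
        have h := hde o ho
        rw [getD_drop, gu o (by omega), gu (r + o) (by omega)] at h
        exact h
      have udlt : w.getD d 0 < w.getD (r + d) 0 := by
        have h := hdlt
        rw [getD_drop, gu d (by omega), gu (r + d) (by omega)] at h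
        exact h
      have hjr : ∀ o, (j + o) % p = (r + o) % p := by
        intro o
        rw [Nat.add_mod j o p, Nat.add_mod r o p, hrdef, Nat.mod_mod_of_dvd]
        exact dvd_rfl
      set k := min d (i - j) with hk
      refine pyLt_of_lt_at k v (v.drop j) ?_ (by rw [hvlen]; omega) (by rw [hslen]; omega) ?_
      · intro o ho
        rw [gs o, gv o (by omega), gv (j + o) (by omega)]
        rw [PR o (by omega), PR (j + o) (by omega), hjr o,
          Nat.mod_eq_of_lt (show r + o < p from by omega), Nat.mod_eq_of_lt (show o < p from by omega)]
        exact ude o (by omega)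
      · rw [gs k, gv k (by omega), gv (j + k) (by omega)]
        by_cases hcase : k = i - j
        · -- the suffix hits the bumped letter W i
          have hjk : j + k = i := by omega
          rw [hjk]
          have hrk : r + k < p := by omega
          have hmod : r + k = i % p := by
            have h1 : (j + k) % p = (r + k) % p := hjr k
            rw [hjk, Nat.mod_eq_of_lt hrk] at h1
            exact h1.symm
          by_cases hkd : k < d
          · rw [PR k (by omega), Nat.mod_eq_of_lt (show k < p from by omega)]
            calc w.getD k 0 = w.getD (r + k) 0 := ude k hkd
              _ = w.getD (i % p) 0 := by rw [hmod]
              _ = w.getD (i - p) 0 := hip.symm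
              _ < w.getD i 0 := hlt
          · have hkd' : k = d := by omega
            calc w.getD k 0 < w.getD (r + k) 0 := by rw [hkd']; exact udlt
              _ = w.getD (i % p) 0 := by rw [hmod]
              _ = w.getD (i - p) 0 := hip.symm
              _ < w.getD i 0 := hlt
        · -- k = d and the mismatch happens inside the periodic run
          have hkd : k = d := by omega
          rw [PR (j + k) (by omega), hjr k, Nat.mod_eq_of_lt (show r + k < p from by omega),
            PR k (by omega), Nat.mod_eq_of_lt (show k < p from by omega), hkd]
          exact udlt

-- extending the periodic run by an equal letter: the longer prefix is not Lyndon
theorem notly_eq (w : List Int) (p i : Nat) (hp : 1 ≤ p) (hpi : p ≤ i) (hin : i < w.length)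
    (hper : ∀ x, p ≤ x → x < i + 1 → w.getD x 0 = w.getD (x - p) 0) :
    ¬ LyP (w.take (i + 1)) := by
  intro hly
  set v := w.take (i + 1) with hv
  have hvlen : v.length = i + 1 := by simp only [hv, List.length_take]; omega
  have h := hly p hp (by rw [hvlen]; omega)
  have hfalse : pyListLt v (v.drop p) = false := by
    refine pyLt_of_prefix (v.drop p) v (by simp) (fun o ho => ?_)
    rw [List.length_drop, hvlen] at ho
    rw [getD_drop, getD_take w (i + 1) (p + o) (by omega), getD_take w (i + 1) o (by omega)]
    rw [hper (p + o) (by omega) (by omega)]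
    congr 1
    omega
  rw [h] at hfalse
  exact Bool.true_eq_false.mp hfalse

-- after a smaller letter: no prefix of length > i is Lyndon
theorem notly_lt (w : List Int) (p i L : Nat) (hp : 1 ≤ p) (hpi : p ≤ i)
    (hper : ∀ x, p ≤ x → x < i → w.getD x 0 = w.getD (x - p) 0)
    (hlt : w.getD i 0 < w.getD (i - p) 0)
    (hL1 : i + 1 ≤ L) (hL2 : L ≤ w.length) : ¬ LyP (w.take L) := by
  intro hly
  set v := w.take L with hv
  have hvlen : v.length = L := by simp only [hv, List.length_take]; omega
  have h := hly p hp (by rw [hvlen]; omega)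
  have hfalse : pyListLt v (v.drop p) = false := by
    refine pyLt_of_gt_at (i - p) v (v.drop p) (fun o ho => ?_) (by rw [hvlen]; omega)
      (by rw [List.length_drop, hvlen]; omega) ?_
    · rw [getD_drop, getD_take w L o (by omega), getD_take w L (p + o) (by omega)]
      rw [hper (p + o) (by omega) (by omega)]
      congr 1
      omega
    · rw [getD_drop, show p + (i - p) = i from by omega,
        getD_take w L i (by omega), getD_take w L (i - p) (by omega)]
      exact hlt
  rw [h] at hfalse
  exact Bool.true_eq_false.mp hfalse

-- the boolean prefix test agrees with LyP
theorem test_iff (w : List Int) (L : Nat) (hL : L ≤ w.length) :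
    lynTest (w.take L) L = true ↔ LyP (w.take L) := by
  have hlen : (w.take L).length = L := by simp only [List.length_take]; omega
  unfold lynTest LyP
  rw [List.all_eq_true]
  constructor
  · intro h j hj1 hj2
    exact h j (List.mem_range'_1.2 ⟨hj1, by rw [hlen] at hj2; omega⟩)
  · intro h j hj
    have hm := List.mem_range'_1.1 hj
    exact h j hm.1 (by rw [hlen]; omega)

-- folding B's loop when the test is false everywhere keeps the accumulator
theorem foldl_keep (w : List Int) (l : List Nat) :
    ∀ acc : Int, (∀ L ∈ l, lynTest (w.take L) L = false) →
    l.foldl (fun best L => let pre := w.take L; if lynTest pre L then (L : Int) else best) acc = acc := by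
  induction l with
  | nil => intro acc _; rfl
  | cons x xs ih =>
    intro acc h
    simp only [List.foldl_cons]
    rw [h x (by simp)]
    exact ih acc (fun L hL => h L (by simp [hL]))

-- B returns p when the length-p prefix is Lyndon and nothing longer is
theorem foldB_eq (w : List Int) (p : Nat) (hp : 1 ≤ p) (hpn : p ≤ w.length)
    (h1 : LyP (w.take p)) (h2 : ∀ L, p < L → L ≤ w.length → ¬ LyP (w.take L)) :
    lyn_py_alt w = (p : Int) := by
  unfold lyn_py_alt
  have hA := List.range'_append (s := 1) (m := p) (n := w.length - p) (step := 1)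
  rw [one_mul, show p + (w.length - p) = w.length from by omega] at hA
  rw [← hA, List.foldl_append]
  have h2' : ∀ L ∈ List.range' (1 + p) (w.length - p), lynTest (w.take L) L = false := by
    intro L hL
    have hm := List.mem_range'_1.1 hL
    have hnot : ¬ LyP (w.take L) := h2 L (by omega) (by omega)
    cases hEq : lynTest (w.take L) L
    · rfl
    · exact absurd ((test_iff w L (by omega)).1 hEq) hnot
  rw [foldl_keep w (List.range' (1 + p) (w.length - p)) _ h2']
  have hB := List.range'_append (s := 1) (m := p - 1) (n := 1) (step := 1)
  rw [one_mul, show (p - 1) + 1 = p from by omega, show 1 + (p - 1) = p from by omega] at hB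
  rw [← hB, List.foldl_append, List.range'_one]
  simp only [List.foldl_cons, List.foldl_nil]
  simp [(test_iff w p hpn).2 h1]

-- main induction over Duval's loop
theorem lynGo_spec (w : List Int) (m : Int) (hmax : ∀ y ∈ w, y ≤ m) :
    ∀ d i p, w.length - i ≤ d → 1 ≤ p → p ≤ i → i ≤ w.length →
    LyP (w.take p) →
    (∀ x, p ≤ x → x < i → w.getD x 0 = w.getD (x - p) 0) →
    (∀ L, p < L → L ≤ i → ¬ LyP (w.take L)) →
    lynGo w (m + 1) i p = lyn_py_alt w := by
  intro d
  induction d with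
  | zero =>
    intro i p hd hp hpi hin hly hper hmaxL
    rw [lynGo, dif_neg (by omega)]
    exact (foldB_eq w p hp (by omega) hly (fun L h1 h2 => hmaxL L h1 (by omega))).symm
  | succ d ih =>
    intro i p hd hp hpi hin hly hper hmaxL
    by_cases h : i < w.length
    · rw [lynGo, dif_pos h]
      simp only []
      have hb : (PySem.List.pyGet? w (i : Int)).getD 0 = w.getD i 0 := by
        rw [PySem.List.pyGet?_natCast, ← List.getD_eq_getElem?_getD]
      have hc : (i : Int) - (p : Int) = ((i - p : Nat) : Int) := by omega
      have hai : (PySem.List.pyGet? (w.take i) ((i : Int) - (p : Int))).getD 0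
          = w.getD (i - p) 0 := by
        rw [hc, PySem.List.pyGet?_natCast, ← List.getD_eq_getElem?_getD]
        exact getD_take w i (i - p) (by omega)
      rw [hb, hai]
      have hmem : w.getD i 0 ∈ w := by
        rw [List.getD_eq_getElem w 0 h]
        exact List.getElem_mem h
      have hble : w.getD i 0 ≤ m := hmax _ hmem
      by_cases hlt : w.getD i 0 < w.getD (i - p) 0
      · rw [if_pos (Or.inl hlt)]
        refine (foldB_eq w p hp (by omega) hly (fun L hL1 hL2 => ?_)).symm
        by_cases hLe : L ≤ i
        · exact hmaxL L hL1 hLe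
        · exact notly_lt w p i L hp hpi hper hlt (by omega) hL2
      · rw [if_neg (fun hor => hor.elim hlt (fun hbig => absurd hbig (by omega)))]
        by_cases heq : w.getD i 0 = w.getD (i - p) 0
        · rw [if_pos heq]
          refine ih (i + 1) p (by omega) hp (by omega) (by omega) hly ?_ ?_
          · intro x hx1 hx2
            by_cases hxi : x < i
            · exact hper x hx1 hxi
            · have hxe : x = i := by omega
              subst hxe; exact heq
          · intro L hL1 hL2
            by_cases hLe : L ≤ i
            · exact hmaxL L hL1 hLe
            · have hLe' : L = i + 1 := by omega
              subst hLe'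
              refine notly_eq w p i hp hpi h (fun x hx1 hx2 => ?_)
              by_cases hxi : x < i
              · exact hper x hx1 hxi
              · have hxe : x = i := by omega
                subst hxe; exact heq
        · rw [if_neg heq]
          have hgt : w.getD (i - p) 0 < w.getD i 0 :=
            lt_of_le_of_ne (not_lt.1 hlt) (fun e => heq e.symm)
          refine ih (i + 1) (i + 1) (by omega) (by omega) le_rfl (by omega)
            (crux w p i hp hpi h hly hper hgt)
            (fun x hx1 hx2 => absurd hx1 (by omega))
            (fun L hL1 hL2 => absurd hL1 (by omega))
    · rw [lynGo, dif_neg h]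
      exact (foldB_eq w p hp (by omega) hly (fun L h1 h2 => hmaxL L h1 (by omega))).symm

-- ===== VERDICT (by name: the statement is the Claim_ definition above) =====
theorem lyn_py_spec : Claim_equal_lyn_py := by
  intro w _ hpre
  unfold Spec_lyn_py lyn_py
  cases hmax : PySem.List.max? w (fun x => x) with
  | none => exact absurd ((PySem.List.max?_eq_none_iff w _).1 hmax) hpre
  | some m =>
    have hn : 1 ≤ w.length := by
      cases w with
      | nil => exact absurd rfl hpre
      | cons x xs => simp
    refine lynGo_spec w m (PySem.List.max?_isMax hmax) w.length 1 1 (by omega) le_rfl le_rfl hn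
      (fun j hj1 hj2 => ?_) (fun x hx1 hx2 => absurd hx1 (by omega))
      (fun L hL1 hL2 => absurd hL1 (by omega))
    have hlen : (w.take 1).length ≤ 1 := by simp
    exact absurd hj2 (by omega)
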